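-- pv_equiv track=rewrite | github.com/HelloSSIFI/HelloWorld | programmers/Lv3_표현_가능한_이진트리/s1_kcw0360.py | solution
-- ===== SOURCE A (Python) =====
-- def binary(num):
--     temp = []
--     while True:    # 2진수로 변환
--         a, b = divmod(num, 2)
--         temp.insert(0, b)
--
--         if a != 0:
--             num = a
--         else:
--             break
--
--     res = ''.join(map(str, temp))
--
--     length = len(res)
--     cnt = 1    # 이진트리 높이
--     while True:    # '0'을 추가하여 이진트리 높이만큼 포화 이진트리가 되도록 글자 수 맞춰주기
--         if length > (2 ** cnt - 1):
--             cnt += 1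
--         else:
--             break
--
--     ln = 2 ** cnt - 1
--     if length != ln:
--         res = '0' * (ln - length) + res
--
--     return res
--
-- def check(num, now, end):    # 중위 순회(Inorder Traversal)로 이진 트리 확인
--     if now == end:    # 해당 노드에 도착한 경우 문자열에서 노드에 해당 하는 값 리턴
--         return num[now]
--
--     mid = (now + end) // 2
--
--     # 이미 False 값이 리턴 되었거나 부모가 더미 노드('0) 인데 자식이 더미 노드가 아닌 경우 False 리턴
--     left = check(num, now, mid - 1)
--     if not left or (num[mid] == '0' and left == '1'):
--         return False
--
--     right = check(num, mid + 1, end)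
--     if not right or (num[mid] == '0' and right == '1'):
--         return False
--
--     if num[mid] == '0' and left == '0' and right == '0':    # 부모, 자식 모두가 '0'인 경우는 '0'을 리턴
--         return '0'
--
--     return '1'    # 부모, 자식 모두가 '1'인 경우 '1'을 리턴
--
-- def solution(numbers):
--     answer = []
--     for number in numbers:
--         bin_num = binary(number)
--
--         if check(bin_num, 0, len(bin_num) - 1):
--             answer.append(1)
--         else:
--             answer.append(0)
--
--     return answer
-- ===== SOURCE B (Python) =====
-- def solution(numbers):
--     def valid(s):
--         if len(s) == 1:
--             return True
--         mid = len(s) // 2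
--         left, root, right = s[:mid], s[mid], s[mid+1:]
--         if root == '0' and ('1' in left or '1' in right):
--             return False
--         return valid(left) and valid(right)
--
--     out = []
--     for number in numbers:
--         s = bin(number)[2:]
--         size = 1
--         while size < len(s):
--             size = 2 * size + 1
--         s = '0' * (size - len(s)) + s
--         out.append(1 if valid(s) else 0)
--     return out
-- ===== Notes on version B (the rewrite author's own statement) =====
-- stated objective: simpler
-- what changed: B converts with bin(number)[2:], pads to the smallest perfect-tree length 2^k-1 with a doubling loop, and validates by a slicing divide-and-conquer that returns a plain boolean using '1'-in-substring membership, instead of A's hand-rolled divmod digit loop, power-of-two height search and inorder index recursion that threads node characters ('0'/'1'/False) upward and compares children to the parent.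
-- outside the precondition, e.g. on solution([-1]): A does not finish within the time limit, B returns [1]
import Mathlib
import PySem

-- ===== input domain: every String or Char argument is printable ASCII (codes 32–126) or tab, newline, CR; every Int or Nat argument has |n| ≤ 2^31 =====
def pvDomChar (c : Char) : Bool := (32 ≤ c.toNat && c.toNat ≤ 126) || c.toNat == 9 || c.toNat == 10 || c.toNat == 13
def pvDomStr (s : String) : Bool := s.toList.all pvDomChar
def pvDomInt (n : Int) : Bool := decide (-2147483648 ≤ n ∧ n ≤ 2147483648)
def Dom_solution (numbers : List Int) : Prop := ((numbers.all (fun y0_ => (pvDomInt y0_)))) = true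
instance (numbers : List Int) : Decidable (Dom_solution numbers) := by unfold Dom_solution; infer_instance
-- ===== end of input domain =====

-- B replaces A's inorder recursion that threads node characters ('0'/'1'/False) upward by a
-- slicing divide-and-conquer validity test using substring membership; objective: simpler.
-- Strings are represented as List Char (PySem.Chars); while-loops carry fuel (64 / the string
-- length), ample for every admitted input — the guards only make the same computation total.

-- ===== PORT A =====
-- the `while True: divmod` loop of binary(): temp.insert(0, b) then recurse on a
def binLoopA (fuel : Nat) (num : Int) (temp : List Int) : List Int :=
  match fuel with
  | 0 => temp
  | f + 1 =>
    let a := PySem.Int.floordiv num 2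
    let b := PySem.Int.mod num 2
    let temp2 := b :: temp
    if a ≠ 0 then binLoopA f a temp2 else temp2

-- the `while True` height loop of binary()
def cntLoopA (fuel : Nat) (length : Int) (cnt : Int) : Int :=
  match fuel with
  | 0 => cnt
  | f + 1 => if length > 2 ^ cnt.toNat - 1 then cntLoopA f length (cnt + 1) else cnt

def binaryA (num : Int) : List Char :=
  let temp := binLoopA 64 num []
  let res := PySem.Chars.join [] (temp.map PySem.Int.toChars)
  let length : Int := res.length
  let cnt := cntLoopA 64 length 1
  let ln : Int := 2 ^ cnt.toNat - 1
  if length ≠ ln then List.replicate (ln - length).toNat '0' ++ res else res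

-- check() returns False or a character; CkA.f is False, CkA.ch c is the character c
inductive CkA where
  | f : CkA
  | ch : Char → CkA
deriving DecidableEq, Repr

-- Python truthiness of check()'s result: False is falsy, a 1-character string is truthy
def ckTruthy : CkA → Bool
  | .f => false
  | .ch _ => true

def checkA (fuel : Nat) (num : List Char) (now endd : Int) : CkA :=
  match fuel with
  | 0 => .f  -- fuel exhaustion: unreachable for the calls solution makes
  | f + 1 =>
    if now = endd then
      match PySem.List.pyGet? num now with
      | some c => .ch c
      | none => .f  -- IndexError: unreachable for the calls solution makes
    else
      let mid := PySem.Int.floordiv (now + endd) 2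
      let left := checkA f num now (mid - 1)
      if ckTruthy left = false ∨ (PySem.List.pyGet? num mid = some '0' ∧ left = .ch '1') then .f
      else
        let right := checkA f num (mid + 1) endd
        if ckTruthy right = false ∨ (PySem.List.pyGet? num mid = some '0' ∧ right = .ch '1') then .f
        else if PySem.List.pyGet? num mid = some '0' ∧ left = .ch '0' ∧ right = .ch '0' then .ch '0'
        else .ch '1'

def solution (numbers : List Int) : List Int :=
  numbers.foldl (fun answer number =>
    let bin_num := binaryA number
    if ckTruthy (checkA bin_num.length bin_num 0 ((bin_num.length : Int) - 1)) then
      answer ++ [1]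
    else
      answer ++ [0]) []

-- ===== PORT B =====
-- valid(s) of Source B; fuel = len(s) at the top call, enough for the halving recursion
def validB (fuel : Nat) (s : List Char) : Bool :=
  match fuel with
  | 0 => false  -- fuel exhaustion: unreachable for the calls solution_alt makes
  | f + 1 =>
    if s.length = 1 then true
    else
      let mid : Nat := s.length / 2  -- len(s) // 2 on a nonnegative length
      let left := PySem.List.slice s none (some (mid : Int))
      let root := PySem.List.pyGet? s (mid : Int)
      let right := PySem.List.slice s (some ((mid : Int) + 1)) none
      if root = some '0' ∧
          (PySem.Chars.isIn ['1'] left = true ∨ PySem.Chars.isIn ['1'] right = true) then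
        false
      else
        validB f left && validB f right

-- the `while size < len(s)` loop of Source B
def sizeLoopB (fuel : Nat) (size : Int) (len : Int) : Int :=
  match fuel with
  | 0 => size
  | f + 1 => if size < len then sizeLoopB f (2 * size + 1) len else size

def solution_alt (numbers : List Int) : List Int :=
  numbers.foldl (fun out number =>
    let s0 := PySem.Int.toBinChars number      -- bin(number)[2:] for number ≥ 0
    let size := sizeLoopB 64 1 (s0.length : Int)
    let s := List.replicate (size - (s0.length : Int)).toNat '0' ++ s0
    out ++ [if validB s.length s then 1 else 0]) []

-- ===== PRECONDITION & SPEC =====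
-- Pre_ excludes lists containing a negative number: there A's `while True: divmod(num, 2)`
-- loop never terminates (num stays negative), so A returns no value at all.
def Pre_solution (numbers : List Int) : Prop := ∀ n ∈ numbers, 0 ≤ n
instance (numbers : List Int) : Decidable (Pre_solution numbers) := by
  unfold Pre_solution; infer_instance

def pvWitness_solution : List Int := [5, 0, 7, 2147483648]

def Spec_solution (numbers : List Int) (out : List Int) : Prop := out = solution_alt numbers
instance (numbers : List Int) (out : List Int) : Decidable (Spec_solution numbers out) := by
  unfold Spec_solution; infer_instance

-- ===== CLAIM (what is proved, stated in full; the proofs are below) =====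
def Claim_equal_solution : Prop :=
  ∀ (numbers : List Int), Dom_solution numbers → Pre_solution numbers →
    Spec_solution numbers (solution numbers)

-- ===== LEMMAS AND PROOFS =====

lemma mem_iff_singleton_infix {c : Char} {l : List Char} : [c] <:+: l ↔ c ∈ l := by
  constructor
  · intro h
    exact (List.singleton_sublist).mp h.sublist
  · intro h
    obtain ⟨s, t, rfl⟩ := List.append_of_mem h
    exact ⟨s, t, by simp⟩

lemma validB_succ (f : Nat) (s : List Char) (h : ¬ s.length = 1) :
    validB (f + 1) s =
      (if PySem.List.pyGet? s ((s.length / 2 : Nat) : Int) = some '0' ∧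
          (PySem.Chars.isIn ['1'] (PySem.List.slice s none (some ((s.length / 2 : Nat) : Int))) = true ∨
           PySem.Chars.isIn ['1'] (PySem.List.slice s (some (((s.length / 2 : Nat) : Int) + 1)) none) = true) then
        false
      else
        validB f (PySem.List.slice s none (some ((s.length / 2 : Nat) : Int))) &&
        validB f (PySem.List.slice s (some (((s.length / 2 : Nat) : Int) + 1)) none)) := by
  rw [validB, if_neg h]

lemma checkA_succ (f : Nat) (num : List Char) (now endd : Int) (h : ¬ now = endd) :
    checkA (f + 1) num now endd =
      (if ckTruthy (checkA f num now (PySem.Int.floordiv (now + endd) 2 - 1)) = false ∨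
          (PySem.List.pyGet? num (PySem.Int.floordiv (now + endd) 2) = some '0' ∧
           checkA f num now (PySem.Int.floordiv (now + endd) 2 - 1) = CkA.ch '1') then CkA.f
       else if ckTruthy (checkA f num (PySem.Int.floordiv (now + endd) 2 + 1) endd) = false ∨
          (PySem.List.pyGet? num (PySem.Int.floordiv (now + endd) 2) = some '0' ∧
           checkA f num (PySem.Int.floordiv (now + endd) 2 + 1) endd = CkA.ch '1') then CkA.f
       else if PySem.List.pyGet? num (PySem.Int.floordiv (now + endd) 2) = some '0' ∧
           checkA f num now (PySem.Int.floordiv (now + endd) 2 - 1) = CkA.ch '0' ∧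
           checkA f num (PySem.Int.floordiv (now + endd) 2 + 1) endd = CkA.ch '0' then CkA.ch '0'
       else CkA.ch '1') := by
  rw [checkA, if_neg h]

lemma binLoopA_map (f : Nat) : ∀ (n : Nat) (temp : List Int),
    (binLoopA f (n : Int) temp).map (fun b => Nat.digitChar b.toNat) =
      Nat.toDigitsCore 2 f n (temp.map (fun b => Nat.digitChar b.toNat)) := by
  induction f with
  | zero => intro n temp; simp [binLoopA, Nat.toDigitsCore]
  | succ f ih =>
    intro n temp
    have hd : PySem.Int.floordiv (n : Int) 2 = ((n / 2 : Nat) : Int) := by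
      exact_mod_cast PySem.Int.floordiv_natCast n 2
    have hm : PySem.Int.mod (n : Int) 2 = ((n % 2 : Nat) : Int) := by
      exact_mod_cast PySem.Int.mod_natCast n 2
    simp only [binLoopA, hd, hm, Nat.toDigitsCore]
    by_cases h : n / 2 = 0
    · simp [h]
      congr 1
    · have h' : ((n / 2 : Nat) : Int) ≠ 0 := by exact_mod_cast h
      simp only [h, if_neg h', ite_not]
      have := ih (n / 2) (((n % 2 : Nat) : Int) :: temp)
      simpa using this

lemma binLoopA_mem (f : Nat) : ∀ (n : Int) (temp : List Int), 0 ≤ n →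
    (∀ b ∈ temp, b = 0 ∨ b = 1) → ∀ b ∈ binLoopA f n temp, b = 0 ∨ b = 1 := by
  induction f with
  | zero => intro n temp _ ht; simpa [binLoopA] using ht
  | succ f ih =>
    intro n temp hn ht
    have hm : PySem.Int.mod n 2 = 0 ∨ PySem.Int.mod n 2 = 1 := by
      have h1 := PySem.Int.mod_nonneg n (b := 2) (by norm_num)
      have h2 := PySem.Int.mod_lt n (b := 2) (by norm_num)
      omega
    have ha : 0 ≤ PySem.Int.floordiv n 2 := by
      rw [PySem.Int.floordiv_eq_ediv_of_pos (by norm_num)]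
      exact Int.ediv_nonneg hn (by norm_num)
    have ht2 : ∀ b ∈ PySem.Int.mod n 2 :: temp, b = 0 ∨ b = 1 := by
      intro b hb
      rcases List.mem_cons.mp hb with h | h
      · subst h; exact hm
      · exact ht b h
    simp only [binLoopA]
    by_cases h : PySem.Int.floordiv n 2 ≠ 0
    · simp only [if_pos h]
      exact ih _ _ ha ht2
    · simp only [if_neg h]
      exact ht2

lemma join_toChars_digits (temp : List Int) (h : ∀ b ∈ temp, b = 0 ∨ b = 1) :
    PySem.Chars.join [] (temp.map PySem.Int.toChars) =
      temp.map (fun b => Nat.digitChar b.toNat) := by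
  have hmap : temp.map PySem.Int.toChars =
      (temp.map (fun b => Nat.digitChar b.toNat)).map (fun c => [c]) := by
    rw [List.map_map]
    apply List.map_congr_left
    intro b hb
    rcases h b hb with rfl | rfl <;> decide
  rw [hmap, PySem.Chars.join_nil_singletons]

lemma toDigitsCore_fuel (f₁ : Nat) : ∀ (f₂ n : Nat) (acc : List Char), n < 2 ^ f₁ → n < 2 ^ f₂ →
    Nat.toDigitsCore 2 (f₁ + 1) n acc = Nat.toDigitsCore 2 (f₂ + 1) n acc := by
  induction f₁ with
  | zero =>
    intro f₂ n acc h1 h2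
    interval_cases n
    cases f₂ <;> simp [Nat.toDigitsCore]
  | succ f₁ ih =>
    intro f₂ n acc h1 h2
    by_cases h : n / 2 = 0
    · cases f₂ <;> simp [Nat.toDigitsCore, h]
    · have hn : 2 ≤ n := by omega
      obtain ⟨f₂', rfl⟩ : ∃ m, f₂ = m + 1 := by
        cases f₂ with
        | zero => omega
        | succ m => exact ⟨m, rfl⟩
      show Nat.toDigitsCore 2 (f₁ + 1 + 1) n acc = Nat.toDigitsCore 2 (f₂' + 1 + 1) n acc
      simp only [Nat.toDigitsCore, h]
      exact ih f₂' (n / 2) _ (by omega) (by omega)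

lemma loopEq (f : Nat) : ∀ (L c : Int), 0 ≤ c →
    sizeLoopB f (2 ^ c.toNat - 1) L = 2 ^ (cntLoopA f L c).toNat - 1 := by
  induction f with
  | zero => intro L c _; simp [sizeLoopB, cntLoopA]
  | succ f ih =>
    intro L c hc
    simp only [sizeLoopB, cntLoopA]
    by_cases h : 2 ^ c.toNat - 1 < L
    · simp only [if_pos h]
      have ht : (c + 1).toNat = c.toNat + 1 := by omega
      have h2 := ih L (c + 1) (by omega)
      rw [ht, pow_succ] at h2
      have hstep : 2 * (2 ^ c.toNat - 1) + 1 = 2 ^ c.toNat * (2 : Int) - 1 := by ring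
      rw [hstep]
      exact h2
    · simp only [if_neg h]

lemma cntLe (f : Nat) : ∀ (L c : Int), 0 ≤ c → L ≤ 2 ^ (c.toNat + f) - 1 →
    c ≤ cntLoopA f L c ∧ L ≤ 2 ^ (cntLoopA f L c).toNat - 1 := by
  induction f with
  | zero => intro L c hc hL; simpa [cntLoopA] using hL
  | succ f ih =>
    intro L c hc hL
    simp only [cntLoopA]
    by_cases h : L > 2 ^ c.toNat - 1
    · simp only [if_pos h]
      have h2 : L ≤ 2 ^ ((c + 1).toNat + f) - 1 := by
        have : (c + 1).toNat + f = c.toNat + (f + 1) := by omega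
        rw [this]; exact hL
      have := ih L (c + 1) (by omega) h2
      exact ⟨by omega, this.2⟩
    · simp only [if_neg h]
      exact ⟨le_refl _, by omega⟩

lemma binLoopA_ne_nil (f : Nat) : ∀ (n : Int) (temp : List Int), temp ≠ [] →
    binLoopA f n temp ≠ [] := by
  induction f with
  | zero => intro n temp h; simpa [binLoopA] using h
  | succ f ih =>
    intro n temp h
    simp only [binLoopA]
    by_cases hc : PySem.Int.floordiv n 2 ≠ 0
    · simp only [if_pos hc]
      exact ih _ _ (by simp)
    · simp only [if_neg hc]
      simp

lemma rawEq (n : Int) (h0 : 0 ≤ n) (h1 : n ≤ 2147483648) :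
    PySem.Chars.join [] ((binLoopA 64 n []).map PySem.Int.toChars) = PySem.Int.toBinChars n := by
  obtain ⟨m, rfl⟩ : ∃ m : Nat, n = (m : Int) := ⟨n.toNat, by omega⟩
  have hm63 : m < 2 ^ 63 := by
    have : m ≤ 2147483648 := by exact_mod_cast h1
    omega
  rw [join_toChars_digits _ (binLoopA_mem 64 _ [] h0 (by simp))]
  rw [binLoopA_map 64 m []]
  have h2 : PySem.Int.toBinChars (m : Int) = Nat.toDigits 2 m := by
    simp [PySem.Int.toBinChars, Nat.toDigits, show ¬ ((m : Int) < 0) by omega]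
  rw [h2, Nat.toDigits]
  simp only [List.map_nil]
  exact toDigitsCore_fuel 63 m m [] hm63 Nat.lt_two_pow_self

lemma rawChars (n : Int) (h0 : 0 ≤ n) (h1 : n ≤ 2147483648) :
    ∀ c ∈ PySem.Int.toBinChars n, c = '0' ∨ c = '1' := by
  rw [← rawEq n h0 h1, join_toChars_digits _ (binLoopA_mem 64 _ [] h0 (by simp))]
  intro c hc
  rw [List.mem_map] at hc
  obtain ⟨b, hb, rfl⟩ := hc
  rcases binLoopA_mem 64 n [] h0 (by simp) b hb with rfl | rfl <;> simp <;> decide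

lemma rawLen1 (n : Int) (h0 : 0 ≤ n) (h1 : n ≤ 2147483648) :
    1 ≤ (PySem.Int.toBinChars n).length := by
  rw [← rawEq n h0 h1, join_toChars_digits _ (binLoopA_mem 64 _ [] h0 (by simp))]
  rw [List.length_map]
  have := binLoopA_ne_nil 63 (PySem.Int.floordiv n 2) [PySem.Int.mod n 2] (by simp)
  have hne : binLoopA 64 n [] ≠ [] := by
    show binLoopA (63 + 1) n [] ≠ []
    simp only [binLoopA]
    by_cases hc : PySem.Int.floordiv n 2 ≠ 0
    · simp only [if_pos hc]
      exact this
    · simp only [if_neg hc]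
      simp
  cases h : binLoopA 64 n [] with
  | nil => exact absurd h hne
  | cons a l => simp

lemma rawLen63 (n : Int) (h0 : 0 ≤ n) (h1 : n ≤ 2147483648) :
    (PySem.Int.toBinChars n).length ≤ 63 := by
  obtain ⟨m, rfl⟩ : ∃ m : Nat, n = (m : Int) := ⟨n.toNat, by omega⟩
  have hm63 : m < 2 ^ 63 := by
    have : m ≤ 2147483648 := by exact_mod_cast h1
    omega
  have h2 : PySem.Int.toBinChars (m : Int) = Nat.toDigits 2 m := by
    simp [PySem.Int.toBinChars, Nat.toDigits, show ¬ ((m : Int) < 0) by omega]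
  rw [h2]
  exact Nat.toDigits_length 2 m 63 (by norm_num) hm63

lemma stringsEq (n : Int) (h0 : 0 ≤ n) (h1 : n ≤ 2147483648) :
    binaryA n =
      List.replicate ((sizeLoopB 64 1 ((PySem.Int.toBinChars n).length : Int)
          - ((PySem.Int.toBinChars n).length : Int))).toNat '0' ++ PySem.Int.toBinChars n := by
  rw [binaryA, rawEq n h0 h1]
  set L : Int := ((PySem.Int.toBinChars n).length : Int) with hL
  have hs : sizeLoopB 64 1 L = 2 ^ (cntLoopA 64 L 1).toNat - 1 := by
    have h := loopEq 64 L 1 (by norm_num)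
    norm_num at h
    exact h
  rw [hs]
  by_cases h : L ≠ 2 ^ (cntLoopA 64 L 1).toNat - 1
  · rw [if_pos h]
  · rw [if_neg h]
    rw [not_ne_iff] at h
    rw [← h]
    simp

lemma chk (k : Nat) (hk : 1 ≤ k) : ∀ (num : List Char) (now fa fb : Nat),
    k ≤ fa → k ≤ fb → now + (2 ^ k - 1) ≤ num.length → (∀ c ∈ num, c = '0' ∨ c = '1') →
    checkA fa num (now : Int) ((now : Int) + 2 ^ k - 2) =
      (if validB fb ((num.drop now).take (2 ^ k - 1)) = true then
        (if '1' ∈ (num.drop now).take (2 ^ k - 1) then CkA.ch '1' else CkA.ch '0')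
      else CkA.f) := by
  induction k, hk using Nat.le_induction with
  | base =>
    intro num now fa fb hfa hfb hlen hch
    obtain ⟨fa', rfl⟩ : ∃ m, fa = m + 1 := ⟨fa - 1, by omega⟩
    obtain ⟨fb', rfl⟩ : ∃ m, fb = m + 1 := ⟨fb - 1, by omega⟩
    have hnow : now < num.length := by omega
    have hdrop : (num.drop now).take (2 ^ 1 - 1) = [num[now]] := by
      simp [List.take_one, List.head?_drop, List.getElem?_eq_getElem hnow]
    have hend : ((now : Int) + 2 ^ 1 - 2) = (now : Int) := by ring
    rw [hend, hdrop]
    simp only [checkA, PySem.List.pyGet?_natCast, List.getElem?_eq_getElem hnow]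
    have hv : validB (fb' + 1) [num[now]] = true := by simp [validB]
    rw [if_pos hv]
    rcases hch num[now] (List.getElem_mem hnow) with h | h <;> rw [h] <;> simp
  | succ k hk ih =>
    intro num now fa fb hfa hfb hlen hch
    obtain ⟨fa', rfl⟩ : ∃ t, fa = t + 1 := ⟨fa - 1, by omega⟩
    obtain ⟨fb', rfl⟩ : ∃ t, fb = t + 1 := ⟨fb - 1, by omega⟩
    have h2k : 1 ≤ 2 ^ k := Nat.one_le_two_pow
    set m : Nat := 2 ^ k - 1 with hmdef
    clear_value m
    have hm1 : 1 ≤ m := by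
      have : 2 ≤ 2 ^ k := by
        calc 2 = 2 ^ 1 := rfl
        _ ≤ 2 ^ k := Nat.pow_le_pow_right (by norm_num) hk
      omega
    have hpownat : 2 ^ (k + 1) = 2 * 2 ^ k := by rw [pow_succ]; ring
    have hmk : 2 ^ k = m + 1 := by omega
    have hLnat : 2 ^ (k + 1) - 1 = 2 * m + 1 := by omega
    have hmcast : ((m : Nat) : Int) = (2 : Int) ^ k - 1 := by
      rw [hmdef, Nat.cast_sub h2k]
      push_cast
      ring
    have hpowcast : ((2 ^ k : Nat) : Int) = (2 : Int) ^ k := by push_cast; ring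
    have hpow1 : (2 : Int) ^ (k + 1) = 2 * 2 ^ k := by rw [pow_succ]; ring
    have h2kI : (1 : Int) ≤ 2 ^ k := by
      calc (1:Int) = ↑(1:Nat) := by norm_num
      _ ≤ ((2^k : Nat) : Int) := by exact_mod_cast h2k
      _ = _ := hpowcast
    -- indices
    have hr : now + m < num.length := by omega
    set r : Char := num[now + m] with hrdef
    set segL : List Char := (num.drop now).take m with hsegL
    set segR : List Char := (num.drop (now + 2 ^ k)).take m with hsegR
    set seg : List Char := (num.drop now).take (2 ^ (k + 1) - 1) with hseg
    have hseglen : seg.length = 2 * m + 1 := by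
      rw [hseg, List.length_take, List.length_drop]
      omega
    -- decomposition of seg
    have hsegtake : seg.take m = segL := by
      rw [hseg, hsegL, List.take_take]
      congr 1
      omega
    have hdropnm : num.drop (now + m) = r :: num.drop (now + m + 1) := by
      rw [List.drop_eq_getElem_cons hr, ← hrdef]
    have hdropm : seg.drop m = r :: segR := by
      rw [hseg, List.drop_take, List.drop_drop]
      rw [hdropnm]
      have h2 : 2 ^ (k + 1) - 1 - m = m + 1 := by omega
      rw [h2, List.take_succ_cons]
      have h3 : now + m + 1 = now + 2 ^ k := by omega
      rw [h3, ← hsegR]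
    have hdec : seg = segL ++ r :: segR := by
      conv_lhs => rw [← List.take_append_drop m seg]
      rw [hsegtake, hdropm]
    have hsegLlen : segL.length = m := by
      rw [hsegL, List.length_take, List.length_drop]
      omega
    have hrmem : r ∈ num := by rw [hrdef]; exact List.getElem_mem hr
    -- the Int midpoint
    have hmid : PySem.Int.floordiv ((now : Int) + ((now : Int) + 2 ^ (k + 1) - 2)) 2
        = ((now + m : Nat) : Int) := by
      have he : ((now : Int) + ((now : Int) + 2 ^ (k + 1) - 2)) = 2 * ((now : Int) + 2 ^ k - 1) := by
        rw [hpow1]; ring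
      rw [he, PySem.Int.floordiv_eq_ediv_of_pos (by norm_num),
        Int.mul_ediv_cancel_left _ (by norm_num)]
      push_cast [hmcast]
      ring
    -- pyGet? at the midpoint
    have hget : PySem.List.pyGet? num ((now + m : Nat) : Int) = some r := by
      rw [PySem.List.pyGet?_natCast, List.getElem?_eq_getElem hr]
    -- left and right subcalls via ih
    have hleft : checkA fa' num (now : Int) (((now + m : Nat) : Int) - 1) =
        (if validB fb' segL = true then (if '1' ∈ segL then CkA.ch '1' else CkA.ch '0')
         else CkA.f) := by
      have harg : (((now + m : Nat) : Int) - 1) = ((now : Int) + 2 ^ k - 2) := by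
        push_cast [hmcast]; ring
      rw [harg, hsegL]
      exact ih num now fa' fb' (by omega) (by omega) (by omega) hch
    have hright : checkA fa' num (((now + m : Nat) : Int) + 1) ((now : Int) + 2 ^ (k + 1) - 2) =
        (if validB fb' segR = true then (if '1' ∈ segR then CkA.ch '1' else CkA.ch '0')
         else CkA.f) := by
      have harg1 : (((now + m : Nat) : Int) + 1) = ((now + 2 ^ k : Nat) : Int) := by
        push_cast [hmcast, hpowcast]; ring
      have harg2 : ((now : Int) + 2 ^ (k + 1) - 2) = (((now + 2 ^ k : Nat) : Int) + 2 ^ k - 2) := by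
        push_cast [hpowcast, hpow1]; ring
      rw [harg1, harg2, hsegR]
      exact ih num (now + 2 ^ k) fa' fb' (by omega) (by omega) (by omega) hch
    -- unfold validB on seg
    have hvB : validB (fb' + 1) seg =
        (if r = '0' ∧ ('1' ∈ segL ∨ '1' ∈ segR) then false
         else validB fb' segL && validB fb' segR) := by
      have hmidb : (2 * m + 1) / 2 = m := by omega
      have hsl : PySem.List.slice seg none (some (m : Int)) = segL := by
        rw [PySem.List.slice_to_natCast, hsegtake]
      have hsr : PySem.List.slice seg (some ((m : Int) + 1)) none = segR := by
        have h1 : ((m : Int) + 1) = ((m + 1 : Nat) : Int) := by push_cast; ring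
        have h2 : seg.drop (m + 1) = segR := by
          conv_lhs => rw [← List.take_append_drop m seg]
          rw [hsegtake, hdropm, show m + 1 = segL.length + 1 from by omega,
            List.drop_length_add_append]
          simp
        rw [h1, PySem.List.slice_from_natCast, h2]
      have hg : PySem.List.pyGet? seg (m : Int) = some r := by
        rw [PySem.List.pyGet?_natCast, hdec]
        rw [List.getElem?_append_right (by omega), hsegLlen]
        simp
      have hne1 : ¬ seg.length = 1 := by omega
      rw [validB_succ fb' seg hne1]
      simp only [hseglen, hmidb, hsl, hsr, hg]
      by_cases hr0 : r = '0'
      · by_cases hL : '1' ∈ segL <;> by_cases hR : '1' ∈ segR <;>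
          simp [hr0, hL, hR, PySem.Chars.isIn_iff_infix, mem_iff_singleton_infix]
      · by_cases hL : '1' ∈ segL <;> by_cases hR : '1' ∈ segR <;>
          simp [hr0, hL, hR, PySem.Chars.isIn_iff_infix, mem_iff_singleton_infix]
    have hmemseg : ('1' ∈ seg) ↔ (r = '1' ∨ '1' ∈ segL ∨ '1' ∈ segR) := by
      rw [hdec]
      simp [List.mem_append, eq_comm]
      tauto
    -- now unfold checkA and do the case analysis
    have hnoweq : ¬ ((now : Int) = (now : Int) + 2 ^ (k + 1) - 2) := by
      rw [hpow1]; omega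
    have hseg1 : ('1' ∈ seg) = (r = '1' ∨ '1' ∈ segL ∨ '1' ∈ segR) := by
      simp [hmemseg]
    rw [checkA_succ fa' num (now : Int) ((now : Int) + 2 ^ (k + 1) - 2) hnoweq]
    simp only [hmid, hget, hleft, hright, hvB, hseg1]
    rcases hch r hrmem with hr0 | hr1
    · by_cases hvL : validB fb' segL = true <;> by_cases hbL : '1' ∈ segL <;>
        by_cases hvR : validB fb' segR = true <;> by_cases hbR : '1' ∈ segR <;>
        simp [hr0, hvL, hbL, hvR, hbR, ckTruthy]
    · by_cases hvL : validB fb' segL = true <;> by_cases hbL : '1' ∈ segL <;>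
        by_cases hvR : validB fb' segR = true <;> by_cases hbR : '1' ∈ segR <;>
        simp [hr1, hvL, hbL, hvR, hbR, ckTruthy]

lemma truthyEq (n : Int) (h0 : 0 ≤ n) (h1 : n ≤ 2147483648) :
    ckTruthy (checkA (binaryA n).length (binaryA n) 0 (((binaryA n).length : Int) - 1)) =
      validB (binaryA n).length (binaryA n) := by
  set raw : List Char := PySem.Int.toBinChars n with hraw
  set L : Int := (raw.length : Int) with hLdef
  have hL1 : 1 ≤ L := by
    have := rawLen1 n h0 h1
    rw [hLdef, hraw]
    exact_mod_cast this
  have hL63 : L ≤ 63 := by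
    have := rawLen63 n h0 h1
    rw [hLdef, hraw]
    exact_mod_cast this
  have hc := cntLe 64 L 1 (by norm_num) (by norm_num; omega)
  set c : Int := cntLoopA 64 L 1 with hcdef
  set K : Nat := c.toNat with hKdef
  have hK1 : 1 ≤ K := by omega
  have hpK : ((2 ^ K : Nat) : Int) = (2 : Int) ^ K := by push_cast; ring
  have h2KN : 1 ≤ 2 ^ K := Nat.one_le_two_pow
  have hS : sizeLoopB 64 1 L = (2 : Int) ^ K - 1 := by
    have h := loopEq 64 L 1 (by norm_num)
    norm_num at h
    rw [h, ← hcdef, ← hKdef]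
  have hP : binaryA n = List.replicate (((2 : Int) ^ K - 1 - L)).toNat '0' ++ raw := by
    rw [stringsEq n h0 h1, ← hraw, ← hLdef, hS]
  have hlenP : (binaryA n).length = 2 ^ K - 1 := by
    rw [hP]
    rw [List.length_append, List.length_replicate]
    omega
  have hchars : ∀ ch ∈ binaryA n, ch = '0' ∨ ch = '1' := by
    rw [hP]
    intro ch hch
    rcases List.mem_append.mp hch with h | h
    · left; exact List.eq_of_mem_replicate h
    · exact rawChars n h0 h1 ch (by rw [hraw] at h; exact h)
  have hKlen : K ≤ (binaryA n).length := by
    have := Nat.lt_two_pow_self (n := K)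
    omega
  have hchk := chk K hK1 (binaryA n) 0 (binaryA n).length (binaryA n).length hKlen hKlen
    (by omega) hchars
  have hseg : ((binaryA n).drop 0).take (2 ^ K - 1) = binaryA n := by
    rw [List.drop_zero]
    exact List.take_of_length_le (by omega)
  rw [hseg] at hchk
  have hPlenI : ((binaryA n).length : Int) = (2 : Int) ^ K - 1 := by
    rw [hlenP]
    omega
  have hidx : ((0 : Nat) : Int) + (2 : Int) ^ K - 2 = ((binaryA n).length : Int) - 1 := by
    rw [hPlenI]
    push_cast
    ring
  rw [hidx] at hchk
  simp only [Nat.cast_zero] at hchk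
  rw [hchk]
  by_cases hv : validB (binaryA n).length (binaryA n) = true <;>
    by_cases h1' : '1' ∈ binaryA n <;>
    simp [hv, h1', ckTruthy]

-- the fold bodies of the two ports, named for the assembly proof
def stepA (answer : List Int) (number : Int) : List Int :=
  let bin_num := binaryA number
  if ckTruthy (checkA bin_num.length bin_num 0 ((bin_num.length : Int) - 1)) then
    answer ++ [1]
  else
    answer ++ [0]

def stepB (out : List Int) (number : Int) : List Int :=
  let s0 := PySem.Int.toBinChars number
  let size := sizeLoopB 64 1 (s0.length : Int)
  let s := List.replicate (size - (s0.length : Int)).toNat '0' ++ s0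
  out ++ [if validB s.length s then 1 else 0]

lemma solution_eq_foldl (nums : List Int) : solution nums = nums.foldl stepA [] := rfl

lemma solution_alt_eq_foldl (nums : List Int) : solution_alt nums = nums.foldl stepB [] := rfl

lemma stepEq (acc : List Int) (x : Int) (h0 : 0 ≤ x) (h1 : x ≤ 2147483648) :
    stepA acc x = stepB acc x := by
  rw [stepA, stepB]
  rw [← stringsEq x h0 h1, truthyEq x h0 h1]
  by_cases hv : validB (binaryA x).length (binaryA x) = true <;> simp [hv]

lemma foldEq : ∀ (nums : List Int) (acc : List Int),
    (∀ x ∈ nums, 0 ≤ x ∧ x ≤ 2147483648) →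
    nums.foldl stepA acc = nums.foldl stepB acc := by
  intro nums
  induction nums with
  | nil => intro acc _; rfl
  | cons x xs ih =>
    intro acc hx
    obtain ⟨h0, h1⟩ := hx x List.mem_cons_self
    simp only [List.foldl_cons]
    rw [stepEq acc x h0 h1]
    exact ih _ (fun y hy => hx y (List.mem_cons_of_mem x hy))

-- ===== VERDICT (by name: the statement is the Claim_ definition above) =====
theorem solution_spec : Claim_equal_solution := by
  intro numbers hdom hpre
  unfold Spec_solution
  rw [solution_eq_foldl, solution_alt_eq_foldl]
  apply foldEq
  intro x hx
  refine ⟨hpre x hx, ?_⟩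
  unfold Dom_solution at hdom
  rw [List.all_eq_true] at hdom
  have := hdom x hx
  simp [pvDomInt] at this
  omega
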